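-- pv_equiv track=rewrite | github.com/developmentseed/titiler-cmr | docs-update-endpoint/packages/datacube_benchmark/src/datacube_benchmark/utils/utils.py | get_surrounding_tiles
-- ===== SOURCE A (Python) =====
-- def get_surrounding_tiles(
--     center_x: int,
--     center_y: int,
--     zoom: int,
--     width: int,
--     height: int,
-- ) -> list[tuple[int, int]]:
--     """
--     Get a list of surrounding tile coordinates for a viewport around (center_x, center_y).
--     This function builds a `width × height` viewport centered on the given tile at the specified zoom level.
--     from https://github.com/developmentseed/titiler-cmr/blob/develop/tests/test_hls_benchmark.py
--
--     Parameters
--     ----------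
--     center_x : int
--         X index of the center tile.
--     center_y : int
--         Y index of the center tile.
--     zoom : int
--         WebMercator zoom level.
--     width : int
--         Viewport width in tiles.
--     height : int
--         Viewport height in tiles.
--
--     Returns
--     -------
--     list of tuple of int
--         List of (x, y) tile indices covering the viewport (row-major order).
--     """
--     if width <= 0 or height <= 0:
--         raise ValueError("width and height must be > 0")
--
--     tiles: list[tuple[int, int]] = []
--     offset_x = width // 2
--     offset_y = height // 2
--     max_tile = _max_tile_index(zoom)
--
--     for y_pos in range(center_y - offset_y, center_y + offset_y + 1):
--         for x_pos in range(center_x - offset_x, center_x + offset_x + 1):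
--             x_valid = max(0, min(x_pos, max_tile))
--             y_valid = max(0, min(y_pos, max_tile))
--             tiles.append((x_valid, y_valid))
--     return tiles
--
-- def _max_tile_index(z: int) -> int:
--     """
--     Compute the maximum valid XYZ tile index for a given zoom level.
--
--     At zoom level `z`, the map is subdivided into 2**z tiles along each axis
--     (x and y). The valid tile indices therefore range from 0 to (2**z - 1).
--     This helper returns the maximum valid index for both axes.
--
--     Parameters
--     ----------
--     z : int
--         Zoom level (must be greater than or equal to 0).
--
--     Returns
--     -------
--     int
--         The maximum valid tile index at zoom ``z``
--         (i.e., ``2**z - 1``).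
--
--     Raises
--     ------
--     ValueError
--         If `z` is negative.
--     """
--     if z < 0:
--         raise ValueError("zoom must be >= 0")
--     return (1 << z) - 1
-- ===== SOURCE B (Python) =====
-- def get_surrounding_tiles(center_x, center_y, zoom, width, height):
--     if width <= 0 or height <= 0:
--         raise ValueError("width and height must be > 0")
--     if zoom < 0:
--         raise ValueError("zoom must be >= 0")
--     m = (1 << zoom) - 1
--
--     def axis(center, size):
--         # the raw index interval [s, e) of this axis
--         s = center - size // 2
--         e = center + size // 2 + 1
--         # run lengths: entries below 0, the in-range segment, entries above m
--         below = max(0, min(e, 0) - s)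
--         above = max(0, e - max(s, m + 1))
--         return [0] * below + list(range(max(s, 0), min(e, m + 1))) + [m] * above
--
--     xs = axis(center_x, width)
--     ys = axis(center_y, height)
--     return [(x, y) for y in ys for x in xs]
-- ===== Notes on version B (the rewrite author's own statement) =====
-- stated objective: faster
-- what changed: B never clamps individual cells: each axis is built by interval-intersection arithmetic as three runs ([0]*below ++ range(lo,hi) ++ [max_tile]*above) and the grid is the cartesian product of the two axis lists, instead of A's nested loop that clamps both coordinates at every cell.
import Mathlib
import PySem

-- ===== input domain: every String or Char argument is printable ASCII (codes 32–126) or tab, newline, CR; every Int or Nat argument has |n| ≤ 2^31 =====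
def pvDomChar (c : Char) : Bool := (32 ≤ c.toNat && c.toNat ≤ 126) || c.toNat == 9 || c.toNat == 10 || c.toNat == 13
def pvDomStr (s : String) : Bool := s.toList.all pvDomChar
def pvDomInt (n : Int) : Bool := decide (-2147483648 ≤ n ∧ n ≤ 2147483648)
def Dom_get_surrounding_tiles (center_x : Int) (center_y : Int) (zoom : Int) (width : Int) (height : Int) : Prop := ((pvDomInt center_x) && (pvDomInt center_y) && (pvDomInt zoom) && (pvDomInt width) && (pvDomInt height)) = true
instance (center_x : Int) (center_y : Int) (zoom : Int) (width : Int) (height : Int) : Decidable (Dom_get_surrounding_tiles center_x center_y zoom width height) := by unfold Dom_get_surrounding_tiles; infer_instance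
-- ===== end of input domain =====

-- B builds each clamped axis by interval-intersection arithmetic as three runs
-- (zeros ++ identity segment ++ max_tile repeats) and takes the cartesian product,
-- instead of A's nested loop clamping both coordinates at every cell (alternative).


-- ===== PORT A =====
-- _max_tile_index(z) = (1 << z) - 1; the z < 0 ValueError is excluded by Pre_ instead.
def max_tile_index (z : Int) : Int := (1 : Int) <<< z.toNat - 1

def get_surrounding_tiles (center_x : Int) (center_y : Int) (zoom : Int) (width : Int) (height : Int) : List (Int × Int) :=
  let offset_x := PySem.Int.floordiv width 2
  let offset_y := PySem.Int.floordiv height 2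
  let max_tile := max_tile_index zoom
  (PySem.List.pyRange (center_y - offset_y) (center_y + offset_y + 1) 1).foldl
    (fun tiles y_pos =>
      (PySem.List.pyRange (center_x - offset_x) (center_x + offset_x + 1) 1).foldl
        (fun tiles x_pos => tiles ++ [(max 0 (min x_pos max_tile), max 0 (min y_pos max_tile))])
        tiles)
    []

-- ===== PORT B =====
-- axis(center, size): three runs [0]*below ++ range(lo, hi) ++ [m]*above (no per-element clamp)
def gst_axis (m : Int) (center : Int) (size : Int) : List Int :=
  let s := center - PySem.Int.floordiv size 2
  let e := center + PySem.Int.floordiv size 2 + 1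
  List.replicate (max 0 (min e 0 - s)).toNat 0
    ++ PySem.List.pyRange (max s 0) (min e (m + 1)) 1
    ++ List.replicate (max 0 (e - max s (m + 1))).toNat m

def get_surrounding_tiles_alt (center_x : Int) (center_y : Int) (zoom : Int) (width : Int) (height : Int) : List (Int × Int) :=
  let m := (1 : Int) <<< zoom.toNat - 1  -- (1 << zoom) - 1; zoom < 0 raises, outside Pre_
  let xs := gst_axis m center_x width
  let ys := gst_axis m center_y height
  ys.flatMap (fun y => xs.map (fun x => (x, y)))

-- ===== PRECONDITION & SPEC =====
-- A raises ValueError iff width ≤ 0 or height ≤ 0 (its own check) or zoom < 0 (_max_tile_index).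
def Pre_get_surrounding_tiles (center_x : Int) (center_y : Int) (zoom : Int) (width : Int) (height : Int) : Prop :=
  0 < width ∧ 0 < height ∧ 0 ≤ zoom
instance (center_x : Int) (center_y : Int) (zoom : Int) (width : Int) (height : Int) : Decidable (Pre_get_surrounding_tiles center_x center_y zoom width height) := by unfold Pre_get_surrounding_tiles; infer_instance

def pvWitness_get_surrounding_tiles : Int × Int × Int × Int × Int := (2, 3, 3, 3, 2)

def Spec_get_surrounding_tiles (center_x : Int) (center_y : Int) (zoom : Int) (width : Int) (height : Int) (out : List (Int × Int)) : Prop := out = get_surrounding_tiles_alt center_x center_y zoom width height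
instance (center_x : Int) (center_y : Int) (zoom : Int) (width : Int) (height : Int) (out : List (Int × Int)) : Decidable (Spec_get_surrounding_tiles center_x center_y zoom width height out) := by unfold Spec_get_surrounding_tiles; infer_instance

-- ===== CLAIM =====
def Claim_equal_get_surrounding_tiles : Prop := ∀ (center_x : Int) (center_y : Int) (zoom : Int) (width : Int) (height : Int), Dom_get_surrounding_tiles center_x center_y zoom width height → Pre_get_surrounding_tiles center_x center_y zoom width height → Spec_get_surrounding_tiles center_x center_y zoom width height (get_surrounding_tiles center_x center_y zoom width height)

-- ===== LEMMAS AND PROOFS =====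

-- clamping a contiguous range elementwise equals the three-run decomposition B builds
theorem map_clamp_pyRange (m : Int) (hm : 0 ≤ m) (e : Int) : ∀ (s : Int),
    (PySem.List.pyRange s e 1).map (fun v => max 0 (min v m)) =
      List.replicate (max 0 (min e 0 - s)).toNat 0
        ++ PySem.List.pyRange (max s 0) (min e (m + 1)) 1
        ++ List.replicate (max 0 (e - max s (m + 1))).toNat m := by
  intro s
  induction hn : (e - s).toNat generalizing s with
  | zero =>
    rw [PySem.List.pyRange_one_eq_nil (by omega), PySem.List.pyRange_one_eq_nil (by omega : min e (m+1) ≤ max s 0),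
      show (max 0 (min e 0 - s)).toNat = 0 from by omega,
      show (max 0 (e - max s (m+1))).toNat = 0 from by omega]
    simp
  | succ n ih =>
    have hlt : s < e := by omega
    rw [PySem.List.pyRange_one_cons hlt, List.map_cons, ih (s+1) (by omega)]
    by_cases h0 : s < 0
    · rw [show max 0 (min s m) = 0 from by omega,
        show (max 0 (min e 0 - s)).toNat = (max 0 (min e 0 - (s+1))).toNat + 1 from by omega,
        show max s 0 = max (s+1) 0 from by omega,
        show max s (m+1) = max (s+1) (m+1) from by omega,
        List.replicate_succ]
      simp
    · by_cases h2 : s ≤ m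
      · rw [show max 0 (min s m) = s from by omega,
          show (max 0 (min e 0 - s)).toNat = 0 from by omega,
          show (max 0 (min e 0 - (s+1))).toNat = 0 from by omega,
          show max s 0 = s from by omega,
          show max (s+1) 0 = s+1 from by omega,
          show max s (m+1) = m+1 from by omega,
          show max (s+1) (m+1) = m+1 from by omega,
          PySem.List.pyRange_one_cons (show s < min e (m+1) from by omega)]
        simp
      · rw [show max 0 (min s m) = m from by omega,
          show (max 0 (min e 0 - s)).toNat = 0 from by omega,
          show (max 0 (min e 0 - (s+1))).toNat = 0 from by omega,
          PySem.List.pyRange_one_eq_nil (show min e (m+1) ≤ max s 0 from by omega),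
          PySem.List.pyRange_one_eq_nil (show min e (m+1) ≤ max (s+1) 0 from by omega),
          show max s (m+1) = s from by omega,
          show max (s+1) (m+1) = s+1 from by omega,
          show (max 0 (e - s)).toNat = (max 0 (e - (s+1))).toNat + 1 from by omega,
          List.replicate_succ]
        simp

-- ===== VERDICT =====
theorem get_surrounding_tiles_spec : Claim_equal_get_surrounding_tiles := by
  intro cx cy z w h _ hpre
  have hm : (0:Int) ≤ (1 : Int) <<< z.toNat - 1 := by
    have : (1:Int) <<< z.toNat = 2 ^ z.toNat := by
      simp [Int.shiftLeft_eq]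
    rw [this]
    have h1 : (1:Int) ≤ 2 ^ z.toNat := one_le_pow₀ (by norm_num)
    omega
  unfold Spec_get_surrounding_tiles get_surrounding_tiles get_surrounding_tiles_alt max_tile_index gst_axis
  simp only [PySem.List.foldl_append_singleton_eq_map]
  rw [PySem.List.foldl_append_eq_flatMap]
  simp only [List.nil_append]
  rw [← map_clamp_pyRange _ hm, ← map_clamp_pyRange _ hm, List.flatMap_map]
  congr 1
  funext y
  rw [List.map_map]
  rfl
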